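-- pv_equiv track=rewrite | github.com/goedel-gang/lsystems | hilbert.py | gen_l
-- ===== SOURCE A (Python) =====
-- class HilA:
--     F = 0
--     L = 1
--     R = 2
--     A = 3
--     B = 4
--
-- RULES = {HilA.A: [HilA.L,
--                   HilA.B,
--                   HilA.F,
--                   HilA.R,
--                   HilA.A,
--                   HilA.F,
--                   HilA.A,
--                   HilA.R,
--                   HilA.F,
--                   HilA.B,
--                   HilA.L],
--          HilA.B: [HilA.R,
--                   HilA.A,
--                   HilA.F,
--                   HilA.L,
--                   HilA.B,
--                   HilA.F,
--                   HilA.B,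
--                   HilA.L,
--                   HilA.F,
--                   HilA.A,
--                   HilA.R]}
--
-- def gen_l(depth, pattern=RULES[HilA.A], rules=RULES):
--     if depth > 1:
--         for i in pattern:
--             if i in rules:
--                 for y in gen_l(depth - 1, pattern=rules[i], rules=rules):
--                     yield y
--             else:
--                yield i
--     else:
--         for i in pattern:
--             yield i
-- ===== SOURCE B (Python) =====
-- class HilA:
--     F = 0
--     L = 1
--     R = 2
--     A = 3
--     B = 4
--
-- RULES = {HilA.A: [HilA.L, HilA.B, HilA.F, HilA.R, HilA.A, HilA.F,
--                   HilA.A, HilA.R, HilA.F, HilA.B, HilA.L],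
--          HilA.B: [HilA.R, HilA.A, HilA.F, HilA.L, HilA.B, HilA.F,
--                   HilA.B, HilA.L, HilA.F, HilA.A, HilA.R]}
--
-- def gen_l(depth, pattern=RULES[HilA.A], rules=RULES):
--     # iterative DFS over an explicit stack instead of recursive generator delegation
--     stack = [(depth, s) for s in reversed(pattern)]
--     while stack:
--         d, s = stack.pop()
--         if d > 1 and s in rules:
--             stack.extend((d - 1, t) for t in reversed(rules[s]))
--         else:
--             yield s
-- ===== Notes on version B (the rewrite author's own statement) =====
-- stated objective: alternative
-- what changed: Replaced A's depth-recursive nesting of generators (each level delegates yields to a sub-generator) by a single iterative loop over an explicit stack of (depth, symbol) entries that yields each symbol directly.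
import Mathlib
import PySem

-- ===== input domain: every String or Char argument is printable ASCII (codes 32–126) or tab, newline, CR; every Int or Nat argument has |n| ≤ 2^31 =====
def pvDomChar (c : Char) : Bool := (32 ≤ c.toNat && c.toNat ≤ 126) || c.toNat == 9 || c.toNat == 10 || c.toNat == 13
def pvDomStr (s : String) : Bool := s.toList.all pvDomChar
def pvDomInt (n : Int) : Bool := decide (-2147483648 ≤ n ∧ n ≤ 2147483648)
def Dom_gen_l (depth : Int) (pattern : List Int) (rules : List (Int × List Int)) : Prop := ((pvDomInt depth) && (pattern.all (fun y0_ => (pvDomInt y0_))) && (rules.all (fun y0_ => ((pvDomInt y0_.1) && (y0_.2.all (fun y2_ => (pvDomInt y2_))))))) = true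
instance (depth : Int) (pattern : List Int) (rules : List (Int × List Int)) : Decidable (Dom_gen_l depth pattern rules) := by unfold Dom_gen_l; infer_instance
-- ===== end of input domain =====

-- B replaces A's recursive nested-generator expansion by a single iterative loop
-- over an explicit stack of (depth, symbol) entries (objective: alternative).
-- Both are generators in Python; equivalence is about the yielded sequence as a list.

-- shared dict-lookup helper: first match in the association list (Python 'i in rules' / 'rules[i]')
def dget? (rules : List (Int × List Int)) (k : Int) : Option (List Int) :=
  match rules with
  | [] => none
  | (a, v) :: rest => if a = k then some v else dget? rest k

-- ===== PORT A =====
-- literal transliteration of A: the 'for i in pattern' loop is recursion on pattern,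
-- the nested 'yield from'-style delegation is the recursive call gen_l (depth-1).
def gen_l (depth : Int) (pattern : List Int) (rules : List (Int × List Int)) : List Int :=
  if h : depth > 1 then
    match pattern with
    | [] => []
    | i :: rest =>
      (match dget? rules i with
       | some p => gen_l (depth - 1) p rules
       | none => [i]) ++ gen_l depth rest rules
  else pattern
termination_by (depth.toNat, pattern.length)
decreasing_by
  · apply Prod.Lex.left; omega
  · apply Prod.Lex.right; simp only [List.length_cons]; omega

-- ===== PORT B =====
-- termination measure for the stack loop: weight of a stack entry = length of its
-- full expansion, indexed by the number of remaining expansion levels (structural on Nat)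
def Wn (rules : List (Int × List Int)) : Nat → Int → Nat
  | 0, _ => 1
  | Nat.succ m, s =>
    match dget? rules s with
    | some p => 1 + (p.map (Wn rules m)).sum
    | none => 1

theorem Wn_pos (rules : List (Int × List Int)) (n : Nat) (s : Int) : 1 ≤ Wn rules n s := by
  cases n with
  | zero => simp [Wn]
  | succ m => rw [Wn]; cases dget? rules s <;> simp

-- the explicit stack loop of Source B; the Lean list's head is the top of the Python
-- stack (Python pops from the end and extends with reversed(rules[s]), which here
-- is prepending rules[s] in order).
def altLoop (rules : List (Int × List Int)) (stack : List (Int × Int)) (out : List Int) :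
    List Int :=
  match stack with
  | [] => out.reverse
  | (d, s) :: rest =>
    if h : d > 1 then
      match hp : dget? rules s with
      | some p => altLoop rules (p.map (fun t => (d - 1, t)) ++ rest) out
      | none => altLoop rules rest (s :: out)
    else altLoop rules rest (s :: out)
termination_by (stack.map (fun q => Wn rules (q.1 - 1).toNat q.2)).sum
decreasing_by
  · have h1 : (d - 1).toNat = (d - 2).toNat + 1 := by omega
    have h1' : d.toNat - 1 = (d - 2).toNat + 1 := by omega
    simp [List.map_map, Function.comp_def, h1, h1', Wn, hp]
  · simp only [List.map_cons, List.sum_cons]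
    have := Wn_pos rules (d - 1).toNat s; omega
  · simp only [List.map_cons, List.sum_cons]
    have := Wn_pos rules (d - 1).toNat s; omega

def gen_l_alt (depth : Int) (pattern : List Int) (rules : List (Int × List Int)) : List Int :=
  altLoop rules (pattern.map (fun s => (depth, s))) []

-- ===== PRECONDITION & SPEC =====
def Spec_gen_l (depth : Int) (pattern : List Int) (rules : List (Int × List Int)) (out : List Int) : Prop := out = gen_l_alt depth pattern rules
instance (depth : Int) (pattern : List Int) (rules : List (Int × List Int)) (out : List Int) : Decidable (Spec_gen_l depth pattern rules out) := by unfold Spec_gen_l; infer_instance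

-- ===== CLAIM (what is proved, stated in full; the proofs are below) =====
def Claim_equal_gen_l : Prop := ∀ (depth : Int) (pattern : List Int) (rules : List (Int × List Int)), Dom_gen_l depth pattern rules → Spec_gen_l depth pattern rules (gen_l depth pattern rules)

-- ===== LEMMAS AND PROOFS =====

theorem gen_l_nil (depth : Int) (rules : List (Int × List Int)) :
    gen_l depth [] rules = [] := by
  rw [gen_l.eq_def]; split <;> rfl

theorem gen_l_le (depth : Int) (pattern : List Int) (rules : List (Int × List Int))
    (h : ¬ depth > 1) : gen_l depth pattern rules = pattern := by
  rw [gen_l.eq_def, dif_neg h]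

theorem gen_l_cons_some (depth i : Int) (rest p : List Int) (rules : List (Int × List Int))
    (h : depth > 1) (hp : dget? rules i = some p) :
    gen_l depth (i :: rest) rules = gen_l (depth - 1) p rules ++ gen_l depth rest rules := by
  rw [gen_l.eq_def, dif_pos h]; simp only [hp]

theorem gen_l_cons_none (depth i : Int) (rest : List Int) (rules : List (Int × List Int))
    (h : depth > 1) (hp : dget? rules i = none) :
    gen_l depth (i :: rest) rules = i :: gen_l depth rest rules := by
  rw [gen_l.eq_def, dif_pos h]; simp only [hp, List.singleton_append]

theorem gen_l_single_some (d s : Int) (p : List Int) (rules : List (Int × List Int))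
    (h : d > 1) (hp : dget? rules s = some p) :
    gen_l d [s] rules = gen_l (d - 1) p rules := by
  rw [gen_l_cons_some d s [] p rules h hp, gen_l_nil, List.append_nil]

theorem gen_l_single_none (d s : Int) (rules : List (Int × List Int))
    (h : d > 1) (hp : dget? rules s = none) :
    gen_l d [s] rules = [s] := by
  rw [gen_l_cons_none d s [] rules h hp, gen_l_nil]

theorem flatten_singleton (l : List Int) : (l.map (fun s => [s])).flatten = l := by
  induction l with
  | nil => rfl
  | cons a r ih => simp [ih]

-- A's result on a pattern is the concatenation of its results on the single symbols
theorem gen_l_flatten (depth : Int) (pattern : List Int) (rules : List (Int × List Int)) :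
    gen_l depth pattern rules
      = (pattern.map (fun s => gen_l depth [s] rules)).flatten := by
  induction pattern with
  | nil => simp [gen_l_nil]
  | cons i rest ih =>
    by_cases h : depth > 1
    · cases hq : dget? rules i with
      | some p =>
        rw [gen_l_cons_some depth i rest p rules h hq, ih,
            List.map_cons, List.flatten_cons, gen_l_single_some depth i p rules h hq]
      | none =>
        rw [gen_l_cons_none depth i rest rules h hq, ih,
            List.map_cons, List.flatten_cons, gen_l_single_none depth i rules h hq,
            List.singleton_append]
    · rw [gen_l_le _ _ _ h]
      have hs : ∀ s : Int, gen_l depth [s] rules = [s] := fun s => gen_l_le _ _ _ h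
      simp only [hs, flatten_singleton]

theorem altLoop_expand (rules : List (Int × List Int)) (d s : Int) (p : List Int)
    (rest : List (Int × Int)) (out : List Int) (h : d > 1) (hp : dget? rules s = some p) :
    altLoop rules ((d, s) :: rest) out
      = altLoop rules (p.map (fun t => (d - 1, t)) ++ rest) out := by
  rw [altLoop, dif_pos h]
  split
  · next p' hp' => rw [hp'] at hp; injection hp with e; rw [e]
  · next hp' => rw [hp'] at hp; cases hp

theorem altLoop_emit (rules : List (Int × List Int)) (d s : Int)
    (rest : List (Int × Int)) (out : List Int)
    (h : ¬ (d > 1 ∧ (dget? rules s).isSome)) :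
    altLoop rules ((d, s) :: rest) out = altLoop rules rest (s :: out) := by
  rw [altLoop]
  by_cases hd : d > 1
  · rw [dif_pos hd]
    split
    · next p' hp' => exact absurd ⟨hd, by rw [hp']; rfl⟩ h
    · rfl
  · rw [dif_neg hd]

-- loop invariant: the stack loop emits out (reversed) followed by the full
-- expansion of every remaining stack entry, top first
theorem altLoop_eq (rules : List (Int × List Int)) (stack : List (Int × Int))
    (out : List Int) :
    altLoop rules stack out
      = out.reverse ++ (stack.map (fun q => gen_l q.1 [q.2] rules)).flatten := by
  induction stack, out using altLoop.induct rules with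
  | case1 out => simp [altLoop]
  | case2 out d s rest h p hp ih =>
    rw [altLoop_expand rules d s p rest out h hp, ih]
    simp only [List.map_cons, List.flatten_cons, List.map_append, List.flatten_append,
      List.map_map]
    rw [gen_l_single_some d s p rules h hp, gen_l_flatten (d - 1) p rules]
    simp [Function.comp_def]
  | case3 out d s rest h hp ih =>
    rw [altLoop_emit rules d s rest out (by simp [hp]), ih]
    simp only [List.map_cons, List.flatten_cons, List.reverse_cons]
    rw [gen_l_single_none d s rules h hp]
    simp
  | case4 out d s rest h ih =>
    rw [altLoop_emit rules d s rest out (by simp [h]), ih]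
    simp only [List.map_cons, List.flatten_cons, List.reverse_cons]
    rw [gen_l_le d [s] rules h]
    simp

-- ===== VERDICT (by name: the statement is the Claim_ definition above) =====
theorem gen_l_spec : Claim_equal_gen_l := by
  intro depth pattern rules _
  unfold Spec_gen_l gen_l_alt
  rw [altLoop_eq, gen_l_flatten]
  simp [List.map_map, Function.comp_def]
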